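-- pv_equiv track=rewrite | github.com/jdmejia92/Connect-TDD | list_util.py | find_streak
-- ===== SOURCE A (Python) =====
-- def find_streak(list_to_search, needle, streak):
--   """
--   Return True if needle's occurrences are found in one or more streaks in list_to_search
--   False if there's less needle's occurrences or occurrence < 0
--   """
--   if streak >= 0:
--     in_streak = False
--     count = 0
--     index = 0
--     while count < streak and index < len(list_to_search):
--       if needle == list_to_search[index]:
--         count += 1
--         in_streak = True
--       else:
--         count = 0
--         in_streak = False
--       index += 1
--     return count >= streak and in_streak
--   else:
--     return False
-- ===== SOURCE B (Python) =====
-- def find_streak(list_to_search, needle, streak):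
--     if streak <= 0:
--         return False
--     # run-length encode the list into maximal runs of equal adjacent values,
--     # then check whether any run of needle is long enough
--     runs = []
--     for x in list_to_search:
--         if runs and runs[-1][0] == x:
--             runs[-1] = (x, runs[-1][1] + 1)
--         else:
--             runs.append((x, 1))
--     return any(k == needle and c >= streak for k, c in runs)
-- ===== Notes on version B (the rewrite author's own statement) =====
-- stated objective: alternative
-- what changed: Replaces the counter-with-reset while-loop (with early exit) by a two-phase pass: run-length encode the list into maximal runs of equal adjacent values, then test whether any run of the needle reaches the streak length.
import Mathlib
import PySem

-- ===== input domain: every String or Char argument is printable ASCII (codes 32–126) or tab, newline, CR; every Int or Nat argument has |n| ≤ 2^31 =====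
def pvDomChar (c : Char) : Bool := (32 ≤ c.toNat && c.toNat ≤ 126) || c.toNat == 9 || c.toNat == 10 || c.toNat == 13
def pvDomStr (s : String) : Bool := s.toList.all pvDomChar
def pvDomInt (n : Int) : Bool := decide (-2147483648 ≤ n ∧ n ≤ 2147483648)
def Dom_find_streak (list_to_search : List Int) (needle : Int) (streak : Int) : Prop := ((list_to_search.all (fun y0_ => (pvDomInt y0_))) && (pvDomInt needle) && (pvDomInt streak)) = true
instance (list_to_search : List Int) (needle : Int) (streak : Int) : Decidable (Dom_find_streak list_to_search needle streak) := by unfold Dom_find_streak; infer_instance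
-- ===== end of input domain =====

-- B: run-length encode into maximal runs, then check any run of needle has length ≥ streak
-- (alternative decomposition; same return value as A everywhere).
-- ===== PORT A =====
-- the while loop: state (count, in_streak), loop while count < streak and the list is nonempty
def findStreakLoop (needle streak : Int) (count : Int) (in_streak : Bool) : List Int → Bool
  | [] => decide (count ≥ streak) && in_streak
  | x :: xs =>
    if count < streak then
      if needle == x then findStreakLoop needle streak (count + 1) true xs
      else findStreakLoop needle streak 0 false xs
    else decide (count ≥ streak) && in_streak

def find_streak (list_to_search : List Int) (needle : Int) (streak : Int) : Bool :=
  if streak ≥ 0 then findStreakLoop needle streak 0 false list_to_search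
  else false

-- ===== PORT B =====
-- one step of the run-length-encoding loop in Source B: extend the last run or start a new one
def rleStep (runs : List (Int × Int)) (x : Int) : List (Int × Int) :=
  match runs.getLast? with
  | some (k, c) => if k == x then runs.dropLast ++ [(x, c + 1)] else runs ++ [(x, 1)]
  | none => [(x, 1)]

def find_streak_alt (list_to_search : List Int) (needle : Int) (streak : Int) : Bool :=
  if streak ≤ 0 then false
  else (list_to_search.foldl rleStep []).any (fun p => p.1 == needle && p.2 ≥ streak)

-- ===== PRECONDITION & SPEC =====
def Spec_find_streak (list_to_search : List Int) (needle : Int) (streak : Int) (out : Bool) : Prop := out = find_streak_alt list_to_search needle streak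
instance (list_to_search : List Int) (needle : Int) (streak : Int) (out : Bool) : Decidable (Spec_find_streak list_to_search needle streak out) := by unfold Spec_find_streak; infer_instance

-- ===== CLAIM (what is proved, stated in full; the proofs are below) =====
def Claim_equal_find_streak : Prop := ∀ (list_to_search : List Int) (needle : Int) (streak : Int), Dom_find_streak list_to_search needle streak → Spec_find_streak list_to_search needle streak (find_streak list_to_search needle streak)

-- ===== LEMMAS AND PROOFS =====

-- A's loop without the early exit: scan the list, keeping the current needle-run count
def hLoop (needle streak : Int) (c : Int) : List Int → Bool
  | [] => decide (c ≥ streak)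
  | x :: xs =>
    if needle == x then hLoop needle streak (c + 1) xs
    else (decide (c ≥ streak)) || hLoop needle streak 0 xs


theorem hLoop_nil (n s c : Int) : hLoop n s c [] = decide (c ≥ s) := rfl

theorem hLoop_cons (n s c x : Int) (xs : List Int) :
    hLoop n s c (x :: xs)
      = if n == x then hLoop n s (c + 1) xs else (decide (c ≥ s) || hLoop n s 0 xs) := rfl

-- functional run-length encoding with a current run (x, c)
def runsGo (x : Int) (c : Int) : List Int → List (Int × Int)
  | [] => [(x, c)]
  | y :: ys => if x == y then runsGo x (c + 1) ys else (x, c) :: runsGo y 1 ys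

theorem hLoop_of_ge (needle streak c : Int) (l : List Int) (h : streak ≤ c) :
    hLoop needle streak c l = true := by
  induction l generalizing c with
  | nil => simp [hLoop]; omega
  | cons x xs ih =>
    simp only [hLoop]
    by_cases hx : needle == x
    · simp [hx]; exact ih (c + 1) (by omega)
    · simp [hx]; left; omega

theorem loop_eq_hLoop (needle streak : Int) (hs : 1 ≤ streak) (l : List Int) :
    ∀ c : Int, 0 ≤ c →
      findStreakLoop needle streak c (decide (0 < c)) l = hLoop needle streak c l := by
  induction l with
  | nil =>
    intro c _
    simp only [findStreakLoop, hLoop]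
    by_cases h : streak ≤ c
    · have h0 : 0 < c := by omega
      simp [ge_iff_le, h, h0]
    · simp [ge_iff_le, h]
  | cons x xs ih =>
    intro c hc
    simp only [findStreakLoop, hLoop]
    by_cases hlt : c < streak
    · simp only [if_pos hlt]
      by_cases hx : needle == x
      · simp only [hx, if_pos]
        have := ih (c + 1) (by omega)
        simpa [show (0 : Int) < c + 1 by omega] using this
      · rw [if_neg hx, if_neg hx]
        have h2 := ih 0 (le_refl 0)
        rw [show (decide ((0:Int) < 0)) = false from by decide] at h2
        have h3 : ¬ (c ≥ streak) := by omega
        simp [h2, h3]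
    · simp only [if_neg hlt]
      have hge : streak ≤ c := by omega
      have hr := hLoop_of_ge needle streak c (x :: xs) hge
      simp only [hLoop] at hr
      rw [hr]
      simp [ge_iff_le]
      omega

theorem rleStep_ne_nil (rs : List (Int × Int)) (y : Int) : rleStep rs y ≠ [] := by
  unfold rleStep
  cases hg : rs.getLast? with
  | none => simp
  | some p => obtain ⟨k, c⟩ := p; by_cases hk : k == y <;> simp [hk]

theorem rleStep_append (rs rs' : List (Int × Int)) (y : Int) (h : rs' ≠ []) :
    rleStep (rs ++ rs') y = rs ++ rleStep rs' y := by
  obtain ⟨init, last, rfl⟩ := (List.eq_nil_or_concat rs').resolve_left h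
  obtain ⟨k, c⟩ := last
  unfold rleStep
  simp only [List.concat_eq_append]
  rw [← List.append_assoc]
  simp only [List.getLast?_concat, List.dropLast_concat]
  by_cases hk : k == y
  · simp [hk]
  · simp [hk]

theorem foldl_rleStep_append (ys : List Int) :
    ∀ (rs rs' : List (Int × Int)), rs' ≠ [] →
      List.foldl rleStep (rs ++ rs') ys = rs ++ List.foldl rleStep rs' ys := by
  induction ys with
  | nil => intro rs rs' _; simp
  | cons y ys ih =>
    intro rs rs' h
    simp only [List.foldl_cons]
    rw [rleStep_append rs rs' y h, ih rs (rleStep rs' y) (rleStep_ne_nil rs' y)]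

theorem foldl_rleStep_single (ys : List Int) :
    ∀ (x c : Int), List.foldl rleStep [(x, c)] ys = runsGo x c ys := by
  induction ys with
  | nil => intro x c; simp [runsGo]
  | cons y ys ih =>
    intro x c
    simp only [List.foldl_cons, runsGo]
    by_cases hx : x == y
    · have hxy : x = y := by simpa using hx
      subst hxy
      rw [if_pos (by simp)]
      have hstep : rleStep [(x, c)] x = [(x, c + 1)] := by
        simp [rleStep]
      rw [hstep, ih]
    · rw [if_neg hx]
      have hstep : rleStep [(x, c)] y = [(x, c)] ++ [(y, 1)] := by
        simp [rleStep, hx]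
      rw [hstep, foldl_rleStep_append ys [(x, c)] [(y, 1)] (by simp), ih]
      rfl

theorem any_runsGo (needle streak : Int) (hs : 1 ≤ streak) (ys : List Int) :
    ∀ (x c : Int),
      ((runsGo x c ys).any (fun p => p.1 == needle && p.2 ≥ streak))
        = if x == needle then hLoop needle streak c ys else hLoop needle streak 0 ys := by
  induction ys with
  | nil =>
    intro x c
    simp only [runsGo, List.any_cons, List.any_nil, hLoop_nil, Bool.or_false]
    by_cases hx : x = needle
    · rw [if_pos (by rw [beq_iff_eq]; exact hx),
          show (x == needle) = true from by rw [beq_iff_eq]; exact hx, Bool.true_and]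
    · rw [if_neg (by rw [beq_iff_eq]; exact hx),
          show (x == needle) = false from by rw [beq_eq_false_iff_ne]; exact hx, Bool.false_and]
      have h0 : ¬ ((0:Int) ≥ streak) := by omega
      simp [h0]
  | cons y ys ih =>
    intro x c
    simp only [runsGo]
    by_cases hxy : x = y
    · rw [if_pos (by rw [beq_iff_eq]; exact hxy), ih x (c + 1)]
      by_cases hx : x = needle
      · have e1 : (x == needle) = true := by rw [beq_iff_eq]; exact hx
        have e2 : (needle == y) = true := by rw [beq_iff_eq]; omega
        simp only [hLoop_cons]
        simp [e1, e2]
      · have e1 : (x == needle) = false := by rw [beq_eq_false_iff_ne]; exact hx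
        have e2 : (needle == y) = false := by rw [beq_eq_false_iff_ne]; omega
        have h0 : (decide ((0:Int) ≥ streak)) = false := by simp; omega
        simp only [hLoop_cons]
        simp [e1, e2, h0]
    · rw [if_neg (by rw [beq_iff_eq]; exact hxy)]
      simp only [List.any_cons, ih y 1]
      by_cases hx : x = needle
      · have e1 : (x == needle) = true := by rw [beq_iff_eq]; exact hx
        have e2 : (y == needle) = false := by rw [beq_eq_false_iff_ne]; omega
        have e3 : (needle == y) = false := by rw [beq_eq_false_iff_ne]; omega
        simp only [hLoop_cons]
        simp [e1, e2, e3]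
      · have e1 : (x == needle) = false := by rw [beq_eq_false_iff_ne]; exact hx
        by_cases hy : y = needle
        · have e2 : (y == needle) = true := by rw [beq_iff_eq]; exact hy
          have e3 : (needle == y) = true := by rw [beq_iff_eq]; omega
          simp only [hLoop_cons]
          simp [e1, e2, e3]
        · have e2 : (y == needle) = false := by rw [beq_eq_false_iff_ne]; exact hy
          have e3 : (needle == y) = false := by rw [beq_eq_false_iff_ne]; omega
          have h0 : (decide ((0:Int) ≥ streak)) = false := by simp; omega
          simp only [hLoop_cons]
          simp [e1, e2, e3, h0]

-- ===== VERDICT (by name: the statement is the Claim_ definition above) =====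
theorem find_streak_spec : Claim_equal_find_streak := by
  unfold Claim_equal_find_streak
  intro l needle streak _
  unfold Spec_find_streak find_streak find_streak_alt
  by_cases hneg : streak ≥ 0
  · rw [if_pos hneg]
    by_cases hz : streak ≤ 0
    · have h0 : streak = 0 := by omega
      subst h0
      rw [if_pos (le_refl 0)]
      cases l with
      | nil => simp [findStreakLoop]
      | cons x xs => simp [findStreakLoop]
    · rw [if_neg hz]
      have hs : 1 ≤ streak := by omega
      have hA : findStreakLoop needle streak 0 false l = hLoop needle streak 0 l := by
        have := loop_eq_hLoop needle streak hs l 0 (le_refl 0)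
        simpa using this
      rw [hA]
      cases l with
      | nil => simp [hLoop_nil]; omega
      | cons x xs =>
        have hstep : rleStep [] x = [(x, 1)] := by simp [rleStep]
        simp only [List.foldl_cons, hstep, foldl_rleStep_single]
        rw [any_runsGo needle streak hs xs x 1]
        by_cases hx : x = needle
        · have e1 : (x == needle) = true := by rw [beq_iff_eq]; exact hx
          have e2 : (needle == x) = true := by rw [beq_iff_eq]; omega
          simp only [hLoop_cons]
          simp [e1, e2]
        · have e1 : (x == needle) = false := by rw [beq_eq_false_iff_ne]; exact hx
          have e2 : (needle == x) = false := by rw [beq_eq_false_iff_ne]; omega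
          have h0 : (decide ((0:Int) ≥ streak)) = false := by simp; omega
          simp only [hLoop_cons]
          simp [e1, e2, h0]
  · rw [if_neg hneg, if_pos (by omega)]
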